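-- pv_equiv track=rewrite | github.com/wkdrudgnsdla/CodingTest | Python3/프로그래머스/0/120956. 옹알이 （1）/옹알이 （1）.py | solution
-- ===== SOURCE A (Python) =====
-- def solution(babbling):
--     answer = 0
--     for word in babbling:
--         joka_say = {"aya", "ye", "woo", "ma"}
--         while True:
--             if word[:3] in joka_say:
--                 joka_say.discard(word[:3])
--                 word = word[3:]
--             elif word[:2] in joka_say:
--                 joka_say.discard(word[:2])
--                 word = word[2:]
--             else: break
--         if word == "":
--             answer += 1
--     return answer
-- ===== SOURCE B (Python) =====
-- def solution(babbling):
--     sounds = ["aya", "ye", "woo", "ma"]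
--
--     def extend(prefix, remaining):
--         words = [prefix]
--         for s in remaining:
--             rest = remaining.copy()
--             rest.remove(s)
--             words += extend(prefix + s, rest)
--         return words
--
--     valid = set(extend("", sounds))
--     answer = 0
--     for w in babbling:
--         if w in valid:
--             answer += 1
--     return answer
-- ===== Notes on version B (the rewrite author's own statement) =====
-- stated objective: faster
-- what changed: A greedily strips matched 3-/2-char prefixes off each word while rebuilding and mutating a set of unused sounds; B precomputes once the finite set of all concatenations of distinct sounds (permutations of subsets, 65 strings) and counts words by a single hash-set membership test each.
import Mathlib
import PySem

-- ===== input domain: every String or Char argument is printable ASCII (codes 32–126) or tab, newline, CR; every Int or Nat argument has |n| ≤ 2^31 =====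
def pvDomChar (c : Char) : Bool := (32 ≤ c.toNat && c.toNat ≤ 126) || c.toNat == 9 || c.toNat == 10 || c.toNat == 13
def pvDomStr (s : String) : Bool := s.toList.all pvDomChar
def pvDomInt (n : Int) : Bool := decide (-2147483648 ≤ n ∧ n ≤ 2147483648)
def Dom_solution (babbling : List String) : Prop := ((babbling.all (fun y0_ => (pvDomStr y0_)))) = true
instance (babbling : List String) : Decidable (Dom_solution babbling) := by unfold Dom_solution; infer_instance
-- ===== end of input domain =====

-- B replaces A's per-word greedy pre-stripping loop by a precomputed table of all
-- concatenations of distinct sounds plus a set-membership test (objective: faster, measured).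

-- ===== PORT A =====
-- termination fact cited by stripLoop's decreasing_by: discarding a member shrinks the set
theorem pvDiscardLt {S : PySem.Set String} {x : String}
    (h : PySem.Set.contains S x = true) : (PySem.Set.discard S x).length < S.length :=
  List.length_filter_lt_length_iff_exists.mpr ⟨x, by simpa using h, by simp⟩

theorem pvEraseLt {s : String} {l : List String} (h : s ∈ l) : (l.erase s).length < l.length := by
  rw [List.length_erase_of_mem h]
  have := List.length_pos_of_mem h
  omega

-- the 'while True' loop of A: strip a 3- or 2-char pre that is still in joka_say
def stripLoop (word : String) (joka : PySem.Set String) : String :=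
  if _h3 : PySem.Set.contains joka (PySem.Str.slice word none (some 3)) then
    stripLoop (PySem.Str.slice word (some 3) none)
      (PySem.Set.discard joka (PySem.Str.slice word none (some 3)))
  else if _h2 : PySem.Set.contains joka (PySem.Str.slice word none (some 2)) then
    stripLoop (PySem.Str.slice word (some 2) none)
      (PySem.Set.discard joka (PySem.Str.slice word none (some 2)))
  else word
termination_by joka.length
decreasing_by
  · exact pvDiscardLt _h3
  · exact pvDiscardLt _h2

def solution (babbling : List String) : Int :=
  babbling.foldl (fun answer word =>
    if stripLoop word (PySem.Set.ofList ["aya", "ye", "woo", "ma"]) = "" then answer + 1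
    else answer) 0

-- ===== PORT B =====
-- all concatenations 'pre ++ (some sounds of remaining, each at most once, any order)'
def extendPerm (pre : String) (remaining : List String) : List String :=
  remaining.attach.foldl (fun words s =>
    words ++ extendPerm (pre ++ s.1) (remaining.erase s.1)) [pre]
termination_by remaining.length
decreasing_by exact pvEraseLt s.2

def solution_alt (babbling : List String) : Int :=
  let valid := PySem.Set.ofList (extendPerm "" ["aya", "ye", "woo", "ma"])
  babbling.foldl (fun answer w =>
    if PySem.Set.contains valid w then answer + 1 else answer) 0

-- ===== PRECONDITION & SPEC =====
def Spec_solution (babbling : List String) (out : Int) : Prop := out = solution_alt babbling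
instance (babbling : List String) (out : Int) : Decidable (Spec_solution babbling out) := by unfold Spec_solution; infer_instance

-- ===== CLAIM (what is proved, stated in full; the proofs are below) =====
def Claim_equal_solution : Prop := ∀ (babbling : List String), Dom_solution babbling → Spec_solution babbling (solution babbling)

-- ===== LEMMAS AND PROOFS =====

-- w is a concatenation of pairwise-distinct elements of S (in any order)
inductive Cat : List String → List Char → Prop
  | nil (S : List String) : Cat S []
  | cons (S : List String) (s : String) (t : List Char)
      (hs : s ∈ S) (h : Cat (S.erase s) t) : Cat S (s.toList ++ t)

theorem pvDiscardEqErase (S : PySem.Set String) (x : String) (h : S.Nodup) :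
    PySem.Set.discard S x = S.erase x := by
  simp only [PySem.Set.discard]
  rw [h.erase_eq_filter]; congr 1

-- membership unfolding for extendPerm
theorem mem_extendPerm_iff (pre : String) (remaining : List String) (w : String) :
    w ∈ extendPerm pre remaining ↔
      w = pre ∨ ∃ s ∈ remaining, w ∈ extendPerm (pre ++ s) (remaining.erase s) := by
  rw [extendPerm, PySem.List.foldl_append_eq_flatMap]
  simp [List.mem_flatMap]

theorem extendPerm_sound (n : Nat) (remaining : List String) (hn : remaining.length ≤ n)
    (pre w : String) (hw : w ∈ extendPerm pre remaining) :
    ∃ t, Cat remaining t ∧ w.toList = pre.toList ++ t := by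
  induction n generalizing remaining pre w with
  | zero =>
    have : remaining = [] := List.length_eq_zero_iff.mp (Nat.le_zero.mp hn)
    subst this
    rcases (mem_extendPerm_iff pre [] w).mp hw with h | ⟨s, hs, _⟩
    · exact ⟨[], Cat.nil _, by simp [h]⟩
    · simp at hs
  | succ m ih =>
    rcases (mem_extendPerm_iff pre remaining w).mp hw with h | ⟨s, hs, hmem⟩
    · exact ⟨[], Cat.nil _, by simp [h]⟩
    · have hlen : (remaining.erase s).length ≤ m := by
        have := pvEraseLt hs; omega
      obtain ⟨t', hc, hwt⟩ := ih (remaining.erase s) hlen (pre ++ s) w hmem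
      exact ⟨s.toList ++ t', Cat.cons _ s t' hs hc, by simpa using hwt⟩

theorem extendPerm_complete (S : List String) (t : List Char) (hc : Cat S t) :
    ∀ (pre w : String), w.toList = pre.toList ++ t → w ∈ extendPerm pre S := by
  induction hc with
  | nil S =>
    intro pre w hw
    have : w = pre := String.toList_inj.mp (by simpa using hw)
    exact (mem_extendPerm_iff pre S w).mpr (Or.inl this)
  | cons S s t hs _ ih =>
    intro pre w hw
    refine (mem_extendPerm_iff pre S w).mpr (Or.inr ⟨s, hs, ?_⟩)
    exact ih (pre ++ s) w (by simpa using hw)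

def pvSounds : List String := ["aya", "ye", "woo", "ma"]

-- string-slice → take/drop bridges, proved once (cheap rewrites in the main proofs)
theorem pvTl3 (w : String) : (PySem.Str.slice w none (some 3)).toList = w.toList.take 3 := by
  simp only [PySem.Str.toList_slice, PySem.Chars.slice_eq_listSlice]
  rw [PySem.List.slice_to _ (by norm_num), show Int.toNat 3 = 3 from rfl]
theorem pvTl2 (w : String) : (PySem.Str.slice w none (some 2)).toList = w.toList.take 2 := by
  simp only [PySem.Str.toList_slice, PySem.Chars.slice_eq_listSlice]
  rw [PySem.List.slice_to _ (by norm_num), show Int.toNat 2 = 2 from rfl]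
theorem pvDr3 (w : String) : (PySem.Str.slice w (some 3) none).toList = w.toList.drop 3 := by
  simp only [PySem.Str.toList_slice, PySem.Chars.slice_eq_listSlice]
  rw [PySem.List.slice_from _ (by norm_num), show Int.toNat 3 = 3 from rfl]
theorem pvDr2 (w : String) : (PySem.Str.slice w (some 2) none).toList = w.toList.drop 2 := by
  simp only [PySem.Str.toList_slice, PySem.Chars.slice_eq_listSlice]
  rw [PySem.List.slice_from _ (by norm_num), show Int.toNat 2 = 2 from rfl]

theorem stripLoop_sound (n : Nat) (S : PySem.Set String) (hn : S.length ≤ n)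
    (hsub : ∀ x ∈ S, x ∈ pvSounds) (hnd : S.Nodup) (w : String)
    (h : stripLoop w S = "") : Cat S w.toList := by
  induction n generalizing S w with
  | zero =>
    have hS : S = [] := List.length_eq_zero_iff.mp (Nat.le_zero.mp hn)
    subst hS
    rw [stripLoop] at h
    simp only [PySem.Set.contains, List.contains, List.elem_nil] at h
    simp only [Bool.false_eq_true, dite_false] at h
    subst h
    exact Cat.nil []
  | succ m ih =>
    rw [stripLoop] at h
    by_cases h3 : PySem.Set.contains S (PySem.Str.slice w none (some 3)) = true
    · rw [dif_pos h3] at h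
      have hpmem : PySem.Str.slice w none (some 3) ∈ S := by
        simpa [PySem.Set.contains] using h3
      rw [pvDiscardEqErase S _ hnd] at h
      have hcat := ih (S.erase _) (by have := pvEraseLt hpmem; omega)
        (fun x hx => hsub x (List.mem_of_mem_erase hx)) (hnd.erase _) _ h
      have hdrop := pvDr3 w
      have htake := pvTl3 w
      rw [hdrop] at hcat
      have := Cat.cons S _ _ hpmem hcat
      rw [htake, List.take_append_drop] at this
      exact this
    · rw [dif_neg h3] at h
      by_cases h2 : PySem.Set.contains S (PySem.Str.slice w none (some 2)) = true
      · rw [dif_pos h2] at h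
        have hpmem : PySem.Str.slice w none (some 2) ∈ S := by
          simpa [PySem.Set.contains] using h2
        rw [pvDiscardEqErase S _ hnd] at h
        have hcat := ih (S.erase _) (by have := pvEraseLt hpmem; omega)
          (fun x hx => hsub x (List.mem_of_mem_erase hx)) (hnd.erase _) _ h
        have hdrop := pvDr2 w
        have htake := pvTl2 w
        rw [hdrop] at hcat
        have := Cat.cons S _ _ hpmem hcat
        rw [htake, List.take_append_drop] at this
        exact this
      · rw [dif_neg h2] at h
        subst h
        simpa using Cat.nil S

-- the element of S that is a prefix of w is picked up by A's 3-then-2 branch order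
theorem stripLoop_complete (S : PySem.Set String) (t : List Char) (hc : Cat S t) :
    (∀ x ∈ S, x ∈ pvSounds) → S.Nodup → ∀ w : String, w.toList = t → stripLoop w S = "" := by
  induction hc with
  | nil S =>
    intro hsub _ w hw
    have hw0 : w = "" := String.toList_inj.mp (by simpa using hw)
    subst hw0
    have hempty : ∀ (k : Int), PySem.Set.contains S (PySem.Str.slice "" none (some k)) ≠ true := by
      intro k hc
      have hmem : PySem.Str.slice "" none (some k) ∈ S := by
        simpa [PySem.Set.contains] using hc
      have h0 : PySem.Str.slice "" none (some k) = "" :=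
        String.toList_inj.mp (by simp [pysem, PySem.List.slice])
      rw [h0] at hmem
      have := hsub _ hmem
      simp [pvSounds] at this
    rw [stripLoop, dif_neg (hempty 3), dif_neg (hempty 2)]
  | cons S s t hs hcat ih =>
    intro hsub hnd w hw
    have ihw := ih (fun x hx => hsub x (List.mem_of_mem_erase hx)) (hnd.erase s)
    have hsnd : s ∈ pvSounds := hsub s hs
    simp only [pvSounds, List.mem_cons, List.not_mem_nil, or_false] at hsnd
    rcases hsnd with rfl | rfl | rfl | rfl
    -- "aya"
    · have hp : PySem.Str.slice w none (some 3) = "aya" :=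
        String.toList_inj.mp (by rw [pvTl3, hw]; exact List.take_left' rfl)
      rw [stripLoop, hp, dif_pos (by simpa [PySem.Set.contains] using hs)]
      rw [pvDiscardEqErase S _ hnd]
      exact ihw _ (by rw [pvDr3, hw]; exact List.drop_left' rfl)
    -- "ye"
    · rcases t with _ | ⟨c, t'⟩
      · have hp : PySem.Str.slice w none (some 3) = "ye" :=
          String.toList_inj.mp (by rw [pvTl3, hw, List.append_nil]; exact List.take_of_length_le (by decide))
        rw [stripLoop, hp, dif_pos (by simpa [PySem.Set.contains] using hs)]
        rw [pvDiscardEqErase S _ hnd]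
        exact ihw _ (by rw [pvDr3, hw, List.append_nil]; exact List.drop_eq_nil_of_le (by decide))
      · have hq : (PySem.Str.slice w none (some 3)).toList = ['y', 'e', c] := by
          rw [pvTl3, hw]
          exact List.take_left' (l₁ := ['y', 'e', c]) rfl
        have h3 : ¬ PySem.Set.contains S (PySem.Str.slice w none (some 3)) = true := by
          intro hcon
          have hmem : PySem.Str.slice w none (some 3) ∈ S := by
            simpa [PySem.Set.contains] using hcon
          have := hsub _ hmem
          simp only [pvSounds, List.mem_cons, List.not_mem_nil, or_false] at this
          rcases this with h | h | h | h <;> rw [h] at hq <;> simp at hq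
        have hp : PySem.Str.slice w none (some 2) = "ye" :=
          String.toList_inj.mp (by rw [pvTl2, hw]; exact List.take_left' rfl)
        rw [stripLoop, dif_neg h3, hp, dif_pos (by simpa [PySem.Set.contains] using hs)]
        rw [pvDiscardEqErase S _ hnd]
        exact ihw _ (by rw [pvDr2, hw]; exact List.drop_left' rfl)
    -- "woo"
    · have hp : PySem.Str.slice w none (some 3) = "woo" :=
        String.toList_inj.mp (by rw [pvTl3, hw]; exact List.take_left' rfl)
      rw [stripLoop, hp, dif_pos (by simpa [PySem.Set.contains] using hs)]
      rw [pvDiscardEqErase S _ hnd]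
      exact ihw _ (by rw [pvDr3, hw]; exact List.drop_left' rfl)
    -- "ma"
    · rcases t with _ | ⟨c, t'⟩
      · have hp : PySem.Str.slice w none (some 3) = "ma" :=
          String.toList_inj.mp (by rw [pvTl3, hw, List.append_nil]; exact List.take_of_length_le (by decide))
        rw [stripLoop, hp, dif_pos (by simpa [PySem.Set.contains] using hs)]
        rw [pvDiscardEqErase S _ hnd]
        exact ihw _ (by rw [pvDr3, hw, List.append_nil]; exact List.drop_eq_nil_of_le (by decide))
      · have hq : (PySem.Str.slice w none (some 3)).toList = ['m', 'a', c] := by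
          rw [pvTl3, hw]
          exact List.take_left' (l₁ := ['m', 'a', c]) rfl
        have h3 : ¬ PySem.Set.contains S (PySem.Str.slice w none (some 3)) = true := by
          intro hcon
          have hmem : PySem.Str.slice w none (some 3) ∈ S := by
            simpa [PySem.Set.contains] using hcon
          have := hsub _ hmem
          simp only [pvSounds, List.mem_cons, List.not_mem_nil, or_false] at this
          rcases this with h | h | h | h <;> rw [h] at hq <;> simp at hq
        have hp : PySem.Str.slice w none (some 2) = "ma" :=
          String.toList_inj.mp (by rw [pvTl2, hw]; exact List.take_left' rfl)
        rw [stripLoop, dif_neg h3, hp, dif_pos (by simpa [PySem.Set.contains] using hs)]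
        rw [pvDiscardEqErase S _ hnd]
        exact ihw _ (by rw [pvDr2, hw]; exact List.drop_left' rfl)

theorem perWord (w : String) :
    (stripLoop w (PySem.Set.ofList ["aya", "ye", "woo", "ma"]) = "") ↔
      PySem.Set.contains (PySem.Set.ofList (extendPerm "" ["aya", "ye", "woo", "ma"])) w = true := by
  have hofl : PySem.Set.ofList ["aya", "ye", "woo", "ma"] = pvSounds := by decide
  have hsub : ∀ x ∈ pvSounds, x ∈ pvSounds := fun x hx => hx
  have hnd : pvSounds.Nodup := by decide
  rw [hofl]
  constructor
  · intro h
    have hcat := stripLoop_sound pvSounds.length pvSounds le_rfl hsub hnd w h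
    have := extendPerm_complete pvSounds w.toList hcat "" w (by simp)
    simpa [PySem.Set.contains, PySem.Set.mem_ofList] using this
  · intro h
    have hw : w ∈ extendPerm "" pvSounds := by
      simpa [PySem.Set.contains, PySem.Set.mem_ofList] using h
    obtain ⟨t, hc, hwt⟩ := extendPerm_sound pvSounds.length pvSounds le_rfl "" w hw
    exact stripLoop_complete pvSounds t hc hsub hnd w (by simpa using hwt)

-- ===== VERDICT (by name: the statement is the Claim_ definition above) =====
theorem solution_spec : Claim_equal_solution := by
  intro babbling _
  unfold Spec_solution solution solution_alt
  have hf : (fun (answer : Int) (word : String) =>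
      if stripLoop word (PySem.Set.ofList ["aya", "ye", "woo", "ma"]) = "" then answer + 1
      else answer) = (fun (answer : Int) (w : String) =>
      if PySem.Set.contains (PySem.Set.ofList (extendPerm "" ["aya", "ye", "woo", "ma"])) w then answer + 1
      else answer) := by
    funext a w
    by_cases h : stripLoop w (PySem.Set.ofList ["aya", "ye", "woo", "ma"]) = ""
    · rw [if_pos h, if_pos ((perWord w).mp h)]
    · rw [if_neg h, if_neg (fun hc => h ((perWord w).mpr hc))]
  rw [hf]
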